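-- pv_equiv track=rewrite | github.com/Babatunde13/30-days-of-code-python-ECX | Python Files/day_5.py | faithful
-- ===== SOURCE A (Python) =====
-- def faithful(number):
--     '''
--     A function named faithful which computes the nth faithful number
--
--     Parameter: number, twhich is used in computing numberth term of the faithful sequence
--
--     Return: Returns the nth term of the faaithful sequence
--
--     @author: Babatunde Koiki
--     Created on 2020-03-29
--     '''
--     number = bin(number)[2:] # Converts the number to binary and turns it into a string
--     res = [] # Creates an empty list where the sum of it's element after computation is the nth term
--     x = 0 # Initialises x to 0, where x is the power in each case
--     for n in number[::-1]: # Loops through the reverse of the binary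
--         res.append(int(n) *( 7 ** x))
--         x = x+1 # Adds 1 to the power, x
--
--     return sum(res) # returns the sum of the list.
-- ===== SOURCE B (Python) =====
-- def faithful(number):
--     # Arithmetic divide-by-2 recursion: the base-2 digits of `number`
--     # reinterpreted in base 7, with no binary-string or power table.
--     if number == 0:
--         return 0
--     return faithful(number // 2) * 7 + number % 2
-- ===== Notes on version B (the rewrite author's own statement) =====
-- stated objective: alternative
-- what changed: Replaces bin()-string traversal with a reversed power-of-7 list and sum by a pure arithmetic recursion f(n) = f(n//2)*7 + n%2, using no string, list or power table at all.
-- outside the precondition, e.g. on faithful(-3): A raises ValueError, B raises RecursionError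
import Mathlib
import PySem

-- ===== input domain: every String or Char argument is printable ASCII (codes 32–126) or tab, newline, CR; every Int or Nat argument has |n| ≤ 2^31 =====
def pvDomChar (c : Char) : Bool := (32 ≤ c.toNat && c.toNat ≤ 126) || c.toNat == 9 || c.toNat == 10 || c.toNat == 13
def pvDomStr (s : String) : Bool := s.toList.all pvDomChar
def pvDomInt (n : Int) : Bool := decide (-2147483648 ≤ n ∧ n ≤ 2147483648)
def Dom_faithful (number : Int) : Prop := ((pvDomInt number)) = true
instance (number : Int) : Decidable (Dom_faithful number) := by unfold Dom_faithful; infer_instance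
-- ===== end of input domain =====

-- B replaces the bin()-string power-of-7 list with an arithmetic divide-by-2 recursion (alternative algorithm; return value only).

-- ===== PORT A =====
-- A-side helper: digit list of bin(number)[2:] for number ≥ 0 (A calls bin and walks the string)
def binNat : Nat → List Int
  | 0 => []
  | (n+1) => binNat ((n+1)/2) ++ [(((n+1) % 2 : Nat) : Int)]
decreasing_by exact Nat.div_lt_self (Nat.succ_pos n) (by norm_num)

def binStr (number : Int) : List Int :=
  if number = 0 then [0] else binNat number.toNat

-- literal port of A: loop over the reversed binary, appending int(n) * 7**x, then sum
def faithful (number : Int) : Int :=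
  let bits := binStr number
  let st := bits.reverse.foldl
    (fun (s : List Int × Nat) d => (s.1 ++ [d * (7:Int) ^ s.2], s.2 + 1)) ([], 0)
  st.1.sum

-- ===== PORT B =====
-- literal port of B: f(n) = f(n//2)*7 + n%2 on the nonnegative domain (Python B recurses on number // 2;
-- on negatives Python B never reaches 0 and raises RecursionError — outside Pre_)
def faithful_alt_rec : Nat → Int
  | 0 => 0
  | (n+1) => faithful_alt_rec ((n+1)/2) * 7 + (((n+1) % 2 : Nat) : Int)
decreasing_by exact Nat.div_lt_self (Nat.succ_pos n) (by norm_num)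

def faithful_alt (number : Int) : Int := faithful_alt_rec number.toNat

-- ===== PRECONDITION & SPEC =====
-- Pre_ excludes negative numbers: there A's bin(number)[2:] starts with 'b' and int('b') raises ValueError.
def Pre_faithful (number : Int) : Prop := 0 ≤ number
instance (number : Int) : Decidable (Pre_faithful number) := by unfold Pre_faithful; infer_instance
def pvWitness_faithful : Int := 5

def Spec_faithful (number : Int) (out : Int) : Prop := out = faithful_alt number
instance (number : Int) (out : Int) : Decidable (Spec_faithful number out) := by unfold Spec_faithful; infer_instance

-- ===== CLAIM (what is proved, stated in full; the proofs are below) =====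
def Claim_equal_faithful : Prop := ∀ (number : Int), Dom_faithful number → Pre_faithful number → Spec_faithful number (faithful number)

-- ===== LEMMAS AND PROOFS =====
-- Σ d_i * 7^(x+i) over a digit list
def powsum : List Int → Nat → Int
  | [], _ => 0
  | d :: t, x => d * (7:Int) ^ x + powsum t (x + 1)

theorem loop_sum (L : List Int) : ∀ (res : List Int) (x : Nat),
    ((L.foldl (fun (s : List Int × Nat) d => (s.1 ++ [d * (7:Int) ^ s.2], s.2 + 1)) (res, x)).1).sum
      = res.sum + powsum L x := by
  induction L with
  | nil => intro res x; simp [powsum]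
  | cons d t ih =>
      intro res x
      simp [List.foldl, powsum, ih]
      ring

theorem powsum_append (d : Int) : ∀ (M : List Int) (x : Nat),
    powsum (M ++ [d]) x = powsum M x + d * (7:Int) ^ (x + M.length) := by
  intro M
  induction M with
  | nil => intro x; simp [powsum]
  | cons e t ih =>
      intro x
      simp only [powsum, ih, List.cons_append, List.length_cons]
      have h : x + 1 + t.length = x + (t.length + 1) := by omega
      rw [h]; ring

-- A's value on digit list L equals the Horner value of L
def hornerL (L : List Int) : Int := L.foldl (fun r d => r * 7 + d) 0

theorem horner_eq (L : List Int) : ∀ (a : Int),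
    L.foldl (fun r d => r * 7 + d) a = a * (7:Int) ^ L.length + powsum L.reverse 0 := by
  induction L with
  | nil => intro a; simp [powsum]
  | cons d t ih =>
      intro a
      simp only [List.foldl, List.reverse_cons, List.length_cons]
      rw [ih, powsum_append]
      simp [pow_succ]
      ring

-- the arithmetic recursion computes the Horner value of the binary digit list
theorem alt_rec_eq (n : Nat) : faithful_alt_rec n = hornerL (binNat n) := by
  induction n using Nat.strong_induction_on with
  | _ n ih =>
    match n with
    | 0 => simp [faithful_alt_rec, binNat, hornerL]
    | (m+1) =>
      rw [faithful_alt_rec, binNat,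
        ih ((m+1)/2) (Nat.div_lt_self (Nat.succ_pos m) (by norm_num))]
      simp [hornerL, List.foldl_append]

-- ===== VERDICT (by name: the statement is the Claim_ definition above) =====
theorem faithful_spec : Claim_equal_faithful := by
  intro number _ hpre
  show faithful number = faithful_alt number
  unfold faithful faithful_alt binStr
  rw [loop_sum _ [] 0]
  by_cases h0 : number = 0
  · simp [h0, powsum, faithful_alt_rec]
  · have hpos : 0 < number := lt_of_le_of_ne hpre (Ne.symm h0)
    simp only [h0]
    rw [alt_rec_eq]
    rw [show hornerL (binNat number.toNat)
        = (binNat number.toNat).foldl (fun r d => r * 7 + d) 0 from rfl,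
      horner_eq]
    simp
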